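-- pv_equiv track=rewrite | github.com/MohammedNadeemPasha/LeetcodePractice | Graph/Trie/XORWithanElementFromArray.py | maximizeXor
-- ===== SOURCE A (Python) =====
-- def maximizeXor(nums, queries):
--     value_root={}
--     sorted_queries=sorted([(i,q) for i,q in enumerate(queries)],key=lambda x: x[1][1])
--     nums.sort()
--     ans=[]
--     j=0
--     for query in sorted_queries:
--         index=query[0]
--         limit=query[1][1]
--         num=query[1][0]
--         while j < len(nums) and nums[j]<=limit:
--             node_2=value_root
--             for i in range(31,-1,-1):
--                 digit=(nums[j]>>i) & 1
--                 if digit in node_2: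
--                     node_2=node_2[digit]
--                 else:
--                     node_2[digit]={}
--                     node_2=node_2[digit]
--             j+=1
--         if not value_root:
--             ans.append((-1, index))
--             continue
--         result=0
--         node=value_root
--         for i in range(31,-1,-1):
--             digit=(num>>i) &1
--             opposite= 1-digit
--             if opposite in node:
--                 result=result+2**i
--                 node=node[opposite]
--             else:
--                 node=node[digit]
--         ans.append((result,index))
--     sorted_ans=[r for r, i in sorted(ans, key=lambda x: x[1])]
--     return sorted_ans
-- ===== SOURCE B (Python) =====
-- def maximizeXor(nums, queries):
--     M = (1 << 32) - 1
--     nums.sort()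
--     ans = []
--     for q in queries:
--         num, limit = q[0], q[1]
--         cands = [x & M for x in nums if x <= limit]
--         ans.append(max((num & M) ^ x for x in cands) if cands else -1)
--     return ans
-- ===== Notes on version B (the rewrite author's own statement) =====
-- stated objective: simpler
-- what changed: Replaces the offline trie construction with two-pointer sweep over limit-sorted queries by a direct per-query scan: for each query in original order, filter nums by the limit and take the max of (num & M) ^ (x & M) over the 32-bit-masked survivors (-1 if none), so the bit trie, the query reordering and the final index re-sort all disappear.
import Mathlib
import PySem

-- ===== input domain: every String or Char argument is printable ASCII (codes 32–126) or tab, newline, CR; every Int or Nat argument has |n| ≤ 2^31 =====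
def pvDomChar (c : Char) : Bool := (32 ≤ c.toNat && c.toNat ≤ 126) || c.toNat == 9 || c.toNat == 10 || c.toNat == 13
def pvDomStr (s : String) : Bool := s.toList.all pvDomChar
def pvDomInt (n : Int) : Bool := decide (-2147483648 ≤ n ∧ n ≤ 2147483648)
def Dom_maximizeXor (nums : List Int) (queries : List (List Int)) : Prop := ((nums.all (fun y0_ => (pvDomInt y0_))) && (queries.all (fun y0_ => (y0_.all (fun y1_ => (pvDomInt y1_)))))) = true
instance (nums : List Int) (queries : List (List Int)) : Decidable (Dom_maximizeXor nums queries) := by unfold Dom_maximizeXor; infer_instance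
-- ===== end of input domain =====

-- B replaces A's offline trie + two-pointer sweep by a per-query brute-force scan of nums (simpler, not faster).
-- Both Pythons sort `nums` in place (the same observable mutation); the equivalence proved here is about the return value.

-- ===== PORT A =====
-- The Python trie is a nest of dicts keyed by bits 0/1; `nil` is "no entry here", an
-- empty dict {} is `node nil nil`.
inductive PyTrie : Type
  | nil : PyTrie
  | node : PyTrie → PyTrie → PyTrie
deriving DecidableEq, Repr

def PyTrie.child : PyTrie → Int → PyTrie
  | .nil, _ => .nil
  | .node z o, d => if d = 0 then z else o

-- `if not value_root:` — the dict has no keys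
def PyTrie.isEmpty : PyTrie → Bool
  | .nil => true
  | .node z o => decide (z = PyTrie.nil) && decide (o = PyTrie.nil)

-- the inner `for i in range(31,-1,-1)` insertion loop: descend into node_2[digit],
-- creating `node_2[digit]={}` when absent, rebuilt functionally
def trieIns : PyTrie → Int → List Int → PyTrie
  | t, _, [] => t
  | t, x, i :: is =>
      let d := PySem.Int.band (x >>> i.toNat) 1   -- (nums[j] >> i) & 1 ; shift amount i ∈ [0,31] is nonnegative
      let c := PyTrie.child t d
      let c' := if c = PyTrie.nil then PyTrie.node .nil .nil else c
      let c'' := trieIns c' x is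
      if d = 0 then PyTrie.node c'' (PyTrie.child t 1) else PyTrie.node (PyTrie.child t 0) c''

-- the query `for i in range(31,-1,-1)` loop carrying `result`
def trieQuery : PyTrie → Int → List Int → Int → Int
  | _, _, [], r => r
  | t, num, i :: is, r =>
      let d := PySem.Int.band (num >>> i.toNat) 1
      let opp := 1 - d
      if PyTrie.child t opp ≠ PyTrie.nil then
        trieQuery (PyTrie.child t opp) num is (r + 2 ^ i.toNat)   -- result = result + 2**i
      else
        trieQuery (PyTrie.child t d) num is r

-- `while j < len(nums) and nums[j] <= limit: ... ; j += 1`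
def insWhile (ns : List Int) (limit : Int) (j : Nat) (t : PyTrie) : Nat × PyTrie :=
  if h : j < ns.length ∧ ns.getD j 0 ≤ limit then
    insWhile ns limit (j + 1) (trieIns t (ns.getD j 0) (PySem.List.pyRange 31 (-1) (-1)))
  else (j, t)
termination_by ns.length - j
decreasing_by omega

def maximizeXor (nums : List Int) (queries : List (List Int)) : List Int :=
  let sorted_queries := PySem.List.sorted (PySem.List.enumerate queries)
      (fun p => PySem.List.pyGetD p.2 1 0) false
  let ns := PySem.List.sorted nums (fun x => x) false        -- nums.sort()
  let fin := sorted_queries.foldl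
    (fun (st : Nat × PyTrie × List (Int × Int)) query =>
      let index := query.1
      let limit := PySem.List.pyGetD query.2 1 0
      let num := PySem.List.pyGetD query.2 0 0
      let jt := insWhile ns limit st.1 st.2.1
      if jt.2.isEmpty then
        (jt.1, jt.2, st.2.2 ++ [((-1 : Int), index)])
      else
        (jt.1, jt.2, st.2.2 ++ [(trieQuery jt.2 num (PySem.List.pyRange 31 (-1) (-1)) 0, index)]))
    (0, PyTrie.nil, [])
  (PySem.List.sorted fin.2.2 (fun p => p.2) false).map (fun p => p.1)

-- ===== PORT B =====
def maximizeXor_alt (nums : List Int) (queries : List (List Int)) : List Int :=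
  let M : Int := (1 <<< 32) - 1
  let ns := PySem.List.sorted nums (fun x => x) false        -- nums.sort()
  queries.map (fun q =>
    let num := PySem.List.pyGetD q 0 0
    let limit := PySem.List.pyGetD q 1 0
    let cands := (ns.filter (fun x => decide (x ≤ limit))).map (fun x => PySem.Int.band x M)
    if cands = [] then -1
    else (PySem.List.max? (cands.map (fun c => PySem.Int.bxor (PySem.Int.band num M) c))
            (fun y => y)).getD 0)

-- ===== PRECONDITION & SPEC =====
-- A raises (IndexError in the sort key / query unpacking) exactly when some query has fewer
-- than two entries; Pre_ excludes those inputs.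
def Pre_maximizeXor (nums : List Int) (queries : List (List Int)) : Prop :=
  ∀ q ∈ queries, 2 ≤ q.length
instance (nums : List Int) (queries : List (List Int)) : Decidable (Pre_maximizeXor nums queries) := by
  unfold Pre_maximizeXor; infer_instance

def pvWitness_maximizeXor : List Int × List (List Int) :=
  ([0, 1, 2, 3, 4], [[3, 1], [1, 3], [5, 6]])

def Spec_maximizeXor (nums : List Int) (queries : List (List Int)) (out : List Int) : Prop := out = maximizeXor_alt nums queries
instance (nums : List Int) (queries : List (List Int)) (out : List Int) : Decidable (Spec_maximizeXor nums queries out) := by unfold Spec_maximizeXor; infer_instance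

-- ===== CLAIM (what is proved, stated in full; the proofs are below) =====
def Claim_equal_maximizeXor : Prop := ∀ (nums : List Int) (queries : List (List Int)), Dom_maximizeXor nums queries → Pre_maximizeXor nums queries → Spec_maximizeXor nums queries (maximizeXor nums queries)

-- ===== LEMMAS AND PROOFS =====

-- [31, 30, ..., 0] in a shape suited to induction
def revRange : Nat → List Int
  | 0 => []
  | k + 1 => (k : Int) :: revRange k

theorem bits32_eq : PySem.List.pyRange 31 (-1) (-1) = revRange 32 := by decide

-- bit i of y, as Python computes it
def nd (i : Nat) (y : Int) : Int := PySem.Int.band (y >>> i) 1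

-- the low-k-bit XOR of m and x, bit by bit
def xorV : Nat → Int → Int → Int
  | 0, _, _ => 0
  | k + 1, m, x => (if nd k m = nd k x then 0 else 2 ^ k) + xorV k m x

theorem nd_cases (i : Nat) (y : Int) : nd i y = 0 ∨ nd i y = 1 := by
  unfold nd
  rw [PySem.Int.band_one]
  have h1 := PySem.Int.mod_nonneg (y >>> i) (b := 2) (by norm_num)
  have h2 := PySem.Int.mod_lt (y >>> i) (b := 2) (by norm_num)
  omega

theorem xorV_nonneg (k : Nat) (m x : Int) : 0 ≤ xorV k m x := by
  induction k with
  | zero => simp [xorV]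
  | succ k ih => simp only [xorV]; split <;> positivity

theorem xorV_lt (k : Nat) (m x : Int) : xorV k m x < 2 ^ k := by
  induction k with
  | zero => simp [xorV]
  | succ k ih =>
    have h0 := xorV_nonneg k m x
    simp only [xorV, pow_succ]
    split <;> omega

-- ============ Python bit semantics: (y>>i)&1, y & (2^32-1), xor as a bit sum ============

theorem band_M (y : Int) : PySem.Int.band y 4294967295 = y % 4294967296 := by
  have hM : ((4294967295 : Int)).toNat = 2 ^ 32 - 1 := by decide
  by_cases hy : 0 ≤ y
  · rw [PySem.Int.band_of_nonneg hy (by norm_num)]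
    rw [hM, Nat.and_two_pow_sub_one_eq_mod]
    have hy0 : (y.toNat : Int) = y := Int.toNat_of_nonneg hy
    calc ((y.toNat % 2 ^ 32 : Nat) : Int) = (y.toNat : Int) % ((2:Int) ^ 32) := by push_cast; ring_nf
      _ = y % 4294967296 := by rw [hy0]; norm_num
  · have hy' : y < 0 := by omega
    unfold PySem.Int.band
    rw [if_neg (by omega), if_pos (by norm_num)]
    have hp : (0:Int) ≤ -y - 1 := by omega
    set p : Nat := (-y - 1).toNat with hpdef
    have hyp : y = -(p : Int) - 1 := by omega
    rw [hM, Nat.land_comm, Nat.and_two_pow_sub_one_eq_mod]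
    set r : Nat := 2 ^ 32 - 1 - p % 2 ^ 32 with hrdef
    have hplt : p % 2 ^ 32 < 2 ^ 32 := Nat.mod_lt _ (by norm_num)
    have hr1 : (r : Int) % 4294967296 = r := by
      apply Int.emod_eq_of_lt (by positivity)
      have : r < 2 ^ 32 := by omega
      omega
    have hsub : (4294967296 : Int) ∣ y - r := by
      have hd1 : (2^32 : Nat) ∣ p - p % 2 ^ 32 := Nat.dvd_sub_mod p
      have : y - r = -(((p - p % 2 ^ 32 : Nat) : Int)) - 4294967296 := by
        have hle : p % 2 ^ 32 ≤ p := Nat.mod_le _ _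
        push_cast [Nat.cast_sub hle, Nat.cast_sub (by omega : p % 2^32 ≤ 2^32 - 1)]
        omega
      rw [this]
      have : (4294967296 : Int) ∣ ((p - p % 2 ^ 32 : Nat) : Int) := by
        exact_mod_cast Int.natCast_dvd_natCast.mpr (by exact_mod_cast hd1)
      omega
    have h5 := Int.emod_eq_emod_iff_emod_sub_eq_zero.mpr (Int.emod_eq_zero_of_dvd hsub)
    have hfin : y % 4294967296 = (r : Int) := by rw [h5, hr1]
    exact hfin.symm

def NB (y : Int) : Nat := (y % 4294967296).toNat

theorem NB_lt (y : Int) : NB y < 2 ^ 32 := by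
  unfold NB
  omega

theorem NB_cast (y : Int) : ((NB y : Nat) : Int) = y % 4294967296 := by
  unfold NB
  omega

theorem nd_div (i : Nat) (y : Int) : nd i y = (y / ((2:Int) ^ i)) % 2 := by
  unfold nd
  rw [PySem.Int.band_one, PySem.Int.mod_eq_emod_of_pos (by norm_num)]
  rw [Int.shiftRight_eq_div_pow]
  push_cast
  rfl

theorem nd_eq (i : Nat) (hi : i < 32) (y : Int) :
    nd i y = if (NB y).testBit i then 1 else 0 := by
  rw [nd_div]
  have hdecomp : y = ((NB y : Nat) : Int) + (2:Int) ^ i * (2 ^ (32 - i) * (y / 4294967296)) := by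
    rw [NB_cast]
    have h2 : (2:Int) ^ i * 2 ^ (32 - i) = 4294967296 := by
      have h32 : i + (32 - i) = 32 := by omega
      rw [← pow_add, h32]
      norm_num
    rw [← mul_assoc, h2]
    omega
  calc (y / ((2:Int) ^ i)) % 2
      = ((((NB y : Nat) : Int) + (2:Int) ^ i * (2 ^ (32 - i) * (y / 4294967296))) / ((2:Int) ^ i)) % 2 := by
        rw [← hdecomp]
    _ = (((NB y : Nat) : Int) / ((2:Int) ^ i) + 2 ^ (32 - i) * (y / 4294967296)) % 2 := by
        rw [Int.add_mul_ediv_left _ _ (by positivity : ((2:Int) ^ i) ≠ 0)]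
    _ = (((NB y : Nat) : Int) / ((2:Int) ^ i)) % 2 := by
        have h3 : (2:Int) ^ (32 - i) * (y / 4294967296) = 2 * (2 ^ (31 - i) * (y / 4294967296)) := by
          rw [← mul_assoc, ← pow_succ']
          congr 2
          omega
        rw [h3, Int.add_mul_emod_self_left]
    _ = ((NB y / 2 ^ i % 2 : Nat) : Int) := by push_cast; rfl
    _ = if (NB y).testBit i then 1 else 0 := by
        have htb : (NB y).testBit i = decide (NB y / 2 ^ i % 2 = 1) :=
          Nat.testBit_eq_decide_div_mod_eq
        rw [htb]
        by_cases hb : NB y / 2 ^ i % 2 = 1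
        · simp [hb]
        · have h0 : NB y / 2 ^ i % 2 = 0 := by omega
          simp [h0]

def sN : Nat → Nat → Nat
  | 0, _ => 0
  | k + 1, c => (if c.testBit k then 2 ^ k else 0) + sN k c

theorem sN_congr (k : Nat) (a b : Nat) (h : ∀ i < k, a.testBit i = b.testBit i) :
    sN k a = sN k b := by
  induction k with
  | zero => rfl
  | succ k ih =>
    simp only [sN, h k (by omega)]
    rw [ih (fun i hi => h i (by omega))]

theorem sN_eq (k : Nat) : ∀ c, c < 2 ^ k → sN k c = c := by
  induction k with
  | zero => intro c hc; interval_cases c; rfl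
  | succ k ih =>
    intro c hc
    have hmod : sN k c = c % 2 ^ k := by
      rw [sN_congr k c (c % 2 ^ k) (fun i hi => by
        rw [Nat.testBit_mod_two_pow]
        simp [hi])]
      exact ih _ (Nat.mod_lt _ (by positivity))
    simp only [sN, hmod]
    have hdm := Nat.div_add_mod c (2 ^ k)
    have hlt2 : c / 2 ^ k < 2 := by
      apply Nat.div_lt_of_lt_mul
      rw [pow_succ] at hc
      omega
    have htb : c.testBit k = decide (c / 2 ^ k % 2 = 1) := Nat.testBit_eq_decide_div_mod_eq
    rw [htb]
    generalize hg : c / 2 ^ k = q at hdm hlt2 ⊢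
    by_cases hb : q % 2 = 1
    · have hq : q = 1 := by omega
      subst hq
      rw [mul_one] at hdm
      norm_num
      omega
    · have hq : q = 0 := by omega
      subst hq
      rw [mul_zero] at hdm
      norm_num
      omega

theorem xorV_sN (k : Nat) (hk : k ≤ 32) (m x : Int) :
    xorV k m x = ((sN k (NB m ^^^ NB x) : Nat) : Int) := by
  induction k with
  | zero => rfl
  | succ k ih =>
    have hk' : k < 32 := by omega
    have hbit : (NB m ^^^ NB x).testBit k = ((NB m).testBit k != (NB x).testBit k) :=
      Nat.testBit_xor _ _ _
    have hnd : (nd k m = nd k x) ↔ ((NB m).testBit k = (NB x).testBit k) := by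
      rw [nd_eq k hk' m, nd_eq k hk' x]
      cases hm : (NB m).testBit k <;> cases hx : (NB x).testBit k <;> simp
    simp only [xorV, sN, ih (by omega)]
    by_cases he : nd k m = nd k x
    · have : (NB m).testBit k = (NB x).testBit k := hnd.mp he
      rw [hbit]
      simp [he, this]
    · have hne : ((NB m).testBit k != (NB x).testBit k) = true := by
        cases hm : (NB m).testBit k <;> cases hx : (NB x).testBit k <;>
          simp_all
      rw [hbit, hne]
      simp only [he, if_false, if_true]
      push_cast
      ring

set_option maxHeartbeats 1000000 in
theorem XKey (m x : Int) :
    PySem.Int.bxor (PySem.Int.band m ((1 <<< 32) - 1)) (PySem.Int.band x ((1 <<< 32) - 1))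
      = xorV 32 m x := by
  have hM : ((1 <<< 32) - 1 : Int) = 4294967295 := by norm_num [Int.shiftLeft_eq]
  rw [hM, band_M m, band_M x]
  have h1 : (0:Int) ≤ m % 4294967296 := by omega
  have h2 : (0:Int) ≤ x % 4294967296 := by omega
  rw [PySem.Int.bxor_of_nonneg h1 h2]
  have hm : (m % 4294967296).toNat = NB m := rfl
  have hx : (x % 4294967296).toNat = NB x := rfl
  rw [hm, hx]
  rw [xorV_sN 32 (le_refl _) m x]
  exact congrArg (fun n : Nat => (n : Int))
    (sN_eq 32 _ (Nat.xor_lt_two_pow (NB_lt m) (NB_lt x))).symm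

-- running maximum (Python max of a nonempty list)
def maxO : List Int → Int
  | [] => 0
  | x :: t => t.foldl max x

theorem maxO_mem {l : List Int} (h : l ≠ []) : maxO l ∈ l := by
  match l with
  | [] => exact absurd rfl h
  | x :: t =>
    rcases PySem.List.foldl_max_mem t x with h' | h' <;> simp [maxO, h']

theorem le_maxO {l : List Int} {x : Int} (h : x ∈ l) : x ≤ maxO l := by
  match l with
  | y :: t =>
    have h' := PySem.List.le_foldl_max t y
    rcases List.mem_cons.mp h with rfl | hm
    · exact h'.1
    · exact h'.2 _ hm

theorem max?_getD_eq_maxO (l : List Int) (h : l ≠ []) :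
    (PySem.List.max? l (fun y => y)).getD 0 = maxO l := by
  match l with
  | x :: t => rw [PySem.List.max?_id_cons]; rfl

-- ============ trie structure lemmas ============

theorem trieIns_cons_ne_nil (t : PyTrie) (x i : Int) (is : List Int) :
    trieIns t x (i :: is) ≠ PyTrie.nil := by
  simp only [trieIns]
  split <;> simp

theorem foldl_trieIns_ne_nil (is : List Int) (i : Int) (js : List Int) (his : is = i :: js)
    (S : List Int) (hS : S ≠ []) (t : PyTrie) :
    S.foldl (fun t x => trieIns t x is) t ≠ PyTrie.nil := by
  induction S generalizing t with
  | nil => exact absurd rfl hS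
  | cons x S ih =>
    simp only [List.foldl_cons]
    rcases eq_or_ne S [] with rfl | hS'
    · simpa [his] using trieIns_cons_ne_nil t x i js
    · exact ih hS' _

theorem trieIns_emptyNode (x : Int) (j : Int) (js : List Int) :
    trieIns (PyTrie.node .nil .nil) x (j :: js) = trieIns PyTrie.nil x (j :: js) := by
  simp only [trieIns, PyTrie.child]
  split <;> simp

theorem trieIns_cons_eq (t : PyTrie) (x i : Int) (is : List Int) :
    trieIns t x (i :: is) =
      (if PySem.Int.band (x >>> i.toNat) 1 = 0 then
        PyTrie.node
          (trieIns (if PyTrie.child t 0 = PyTrie.nil then PyTrie.node .nil .nil else PyTrie.child t 0) x is)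
          (PyTrie.child t 1)
      else
        PyTrie.node (PyTrie.child t 0)
          (trieIns (if PyTrie.child t 1 = PyTrie.nil then PyTrie.node .nil .nil else PyTrie.child t 1) x is)) := by
  have hc := nd_cases i.toNat x
  simp only [nd] at hc
  simp only [trieIns]
  rcases hc with h | h <;> simp [h]

theorem child_trieIns_step (k : Nat) (is' : List Int) (h : is' ≠ []) (t : PyTrie)
    (x d : Int) (hd : d = 0 ∨ d = 1) :
    PyTrie.child (trieIns t x ((k : Int) :: is')) d
      = if nd k x = d then trieIns (PyTrie.child t d) x is' else PyTrie.child t d := by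
  obtain ⟨j, js, rfl⟩ : ∃ j js, is' = j :: js := by
    cases is' with
    | nil => exact absurd rfl h
    | cons j js => exact ⟨j, js, rfl⟩
  have hnd : PySem.Int.band (x >>> ((k : Int)).toNat) 1 = nd k x := by simp [nd]
  rw [trieIns_cons_eq, hnd]
  have hemp : ∀ c : PyTrie,
      trieIns (if c = PyTrie.nil then PyTrie.node .nil .nil else c) x (j :: js)
        = trieIns c x (j :: js) := by
    intro c
    split_ifs with hc
    · subst hc; exact trieIns_emptyNode x j js
    · rfl
  rcases nd_cases k x with hdx | hdx <;> rcases hd with rfl | rfl <;>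
    simp [hdx, PyTrie.child, hemp]

theorem isEmpty_trieIns32 (t : PyTrie) (x : Int) :
    (trieIns t x (revRange 32)).isEmpty = false := by
  have h32 : revRange 32 = ((31 : Nat) : Int) :: revRange 31 := rfl
  have h31 : revRange 31 = ((30 : Nat) : Int) :: revRange 30 := rfl
  rw [h32, trieIns_cons_eq]
  split
  · have hA := trieIns_cons_ne_nil
      (if PyTrie.child t 0 = PyTrie.nil then PyTrie.node .nil .nil else PyTrie.child t 0) x
      ((30 : Nat) : Int) (revRange 30)
    rw [← h31] at hA
    simp [PyTrie.isEmpty, hA]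
  · have hA := trieIns_cons_ne_nil
      (if PyTrie.child t 1 = PyTrie.nil then PyTrie.node .nil .nil else PyTrie.child t 1) x
      ((30 : Nat) : Int) (revRange 30)
    rw [← h31] at hA
    simp [PyTrie.isEmpty, hA]

theorem isEmpty_foldl (S : List Int) (t : PyTrie) :
    (S.foldl (fun t x => trieIns t x (revRange 32)) t).isEmpty = false ∨
      (S = [] ∧ S.foldl (fun t x => trieIns t x (revRange 32)) t = t) := by
  induction S generalizing t with
  | nil => exact Or.inr ⟨rfl, rfl⟩
  | cons x S ih =>
    simp only [List.foldl_cons]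
    rcases ih (trieIns t x (revRange 32)) with h | ⟨rfl, h⟩
    · exact Or.inl h
    · simp only [List.foldl_nil]
      exact Or.inl (isEmpty_trieIns32 t x)

-- child of the fold, inner levels
theorem child_foldl (k : Nat) (is' : List Int) (h : is' ≠ []) (S : List Int) (t : PyTrie)
    (d : Int) (hd : d = 0 ∨ d = 1) :
    PyTrie.child (S.foldl (fun t x => trieIns t x ((k : Int) :: is')) t) d
      = (S.filter (fun x => nd k x == d)).foldl (fun t x => trieIns t x is') (PyTrie.child t d) := by
  induction S generalizing t with
  | nil => rfl
  | cons x S ih =>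
    simp only [List.foldl_cons, List.filter_cons]
    rw [ih, child_trieIns_step k is' h t x d hd]
    by_cases hx : nd k x = d
    · simp [hx]
    · simp [hx]

-- child of the fold, leaf level
theorem child_trieIns_leaf (k : Nat) (t : PyTrie) (x d : Int) (hd : d = 0 ∨ d = 1) :
    PyTrie.child (trieIns t x [(k : Int)]) d
      = if nd k x = d then
          (if PyTrie.child t d = PyTrie.nil then PyTrie.node .nil .nil else PyTrie.child t d)
        else PyTrie.child t d := by
  have hnd : PySem.Int.band (x >>> ((k : Int)).toNat) 1 = nd k x := by simp [nd]
  rw [trieIns_cons_eq, hnd]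
  rcases nd_cases k x with hdx | hdx <;> rcases hd with rfl | rfl <;>
    simp [hdx, PyTrie.child, trieIns]

theorem child_foldl_leaf (k : Nat) (S : List Int) (t : PyTrie) (d : Int) (hd : d = 0 ∨ d = 1) :
    PyTrie.child (S.foldl (fun t x => trieIns t x [(k : Int)]) t) d
      = if S.filter (fun x => nd k x == d) = [] then PyTrie.child t d
        else (if PyTrie.child t d = PyTrie.nil then PyTrie.node .nil .nil else PyTrie.child t d) := by
  induction S generalizing t with
  | nil => simp
  | cons x S ih =>
    simp only [List.foldl_cons, List.filter_cons]
    rw [ih, child_trieIns_leaf k t x d hd]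
    by_cases hx : nd k x = d
    · simp only [hx, beq_self_eq_true, if_true, List.cons_ne_nil, if_false]
      split_ifs with h1 h2 <;> simp_all
    · simp [hx]

-- "t represents S at depth k" (at depth 0 the query never looks at t)
def rep : Nat → List Int → PyTrie → Prop
  | 0, _, _ => True
  | k + 1, S, t => t = S.foldl (fun t x => trieIns t x (revRange (k + 1))) PyTrie.nil

theorem maxO_split (S : List Int) (p : Int → Bool) (f g : Int → Int) (C : Int)
    (hfp : ∀ x ∈ S, p x = true → f x = C + g x)
    (hfn : ∀ x ∈ S, p x = false → f x < C)
    (hg : ∀ x ∈ S, 0 ≤ g x)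
    (hne : S.filter p ≠ []) :
    maxO (S.map f) = C + maxO ((S.filter p).map g) := by
  have hSne : S ≠ [] := by
    intro h; exact hne (by simp [h])
  have hmapne : S.map f ≠ [] := by simpa using hSne
  have hfilmapne : (S.filter p).map g ≠ [] := by simpa using hne
  have hmax0 : 0 ≤ maxO ((S.filter p).map g) := by
    obtain ⟨x1, hx1, hq⟩ := List.mem_map.mp (maxO_mem hfilmapne)
    rw [← hq]
    exact hg x1 (List.mem_of_mem_filter hx1)
  apply le_antisymm
  · obtain ⟨x0, hx0, hq⟩ := List.mem_map.mp (maxO_mem hmapne)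
    rw [← hq]
    cases hp : p x0 with
    | true =>
      rw [hfp x0 hx0 hp]
      have : g x0 ≤ maxO ((S.filter p).map g) :=
        le_maxO (List.mem_map.mpr ⟨x0, List.mem_filter.mpr ⟨hx0, hp⟩, rfl⟩)
      omega
    | false =>
      have := hfn x0 hx0 hp
      omega
  · obtain ⟨x1, hx1, hq⟩ := List.mem_map.mp (maxO_mem hfilmapne)
    rw [← hq]
    have hx1S := List.mem_of_mem_filter hx1
    have hpx1 := (List.mem_filter.mp hx1).2
    rw [← hfp x1 hx1S hpx1]
    exact le_maxO (List.mem_map.mpr ⟨x1, hx1S, rfl⟩)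

-- children of the depth-(k+1) trie built from nil represent the digit-filtered lists
theorem child_fold_rep (k : Nat) (S : List Int) (d : Int) (hd : d = 0 ∨ d = 1) :
    (S.filter (fun x => nd k x == d) = [] →
      PyTrie.child (S.foldl (fun t x => trieIns t x (revRange (k + 1))) PyTrie.nil) d = PyTrie.nil) ∧
    (S.filter (fun x => nd k x == d) ≠ [] →
      PyTrie.child (S.foldl (fun t x => trieIns t x (revRange (k + 1))) PyTrie.nil) d ≠ PyTrie.nil ∧
      rep k (S.filter (fun x => nd k x == d))
        (PyTrie.child (S.foldl (fun t x => trieIns t x (revRange (k + 1))) PyTrie.nil) d)) := by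
  cases k with
  | zero =>
    have h1 : revRange 1 = [((0 : Nat) : Int)] := rfl
    rw [h1]
    have := child_foldl_leaf 0 S PyTrie.nil d hd
    rw [this]
    constructor
    · intro h; simp [h, PyTrie.child]
    · intro h; simp [h, PyTrie.child, rep]
  | succ k' =>
    have h1 : revRange (k' + 2) = ((k' + 1 : Nat) : Int) :: revRange (k' + 1) := rfl
    have h2 : revRange (k' + 1) = ((k' : Nat) : Int) :: revRange k' := rfl
    have hne : revRange (k' + 1) ≠ [] := by rw [h2]; simp
    rw [h1]
    have := child_foldl (k' + 1) (revRange (k' + 1)) hne S PyTrie.nil d hd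
    rw [this]
    constructor
    · intro h; simp [h, PyTrie.child]
    · intro h
      constructor
      · simpa [PyTrie.child] using foldl_trieIns_ne_nil _ _ _ h2 _ h PyTrie.nil
      · simp [rep, PyTrie.child]

-- ============ the greedy walk computes the maximum ============

theorem greedy (k : Nat) : ∀ (S : List Int) (m r : Int) (t : PyTrie), S ≠ [] → rep k S t →
    trieQuery t m (revRange k) r = r + maxO (S.map (fun x => xorV k m x)) := by
  induction k with
  | zero =>
    intro S m r t hS _
    have : maxO (S.map (fun x => xorV 0 m x)) = 0 := by
      have hne : S.map (fun x => xorV 0 m x) ≠ [] := by simpa using hS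
      obtain ⟨x0, _, hq⟩ := List.mem_map.mp (maxO_mem hne)
      exact hq.symm
    simp [revRange, trieQuery, this]
  | succ k ih =>
    intro S m r t hS hrep
    have hrev : revRange (k + 1) = ((k : Nat) : Int) :: revRange k := rfl
    have hdm := nd_cases k m
    have hopp : (1 - nd k m) = 0 ∨ (1 - nd k m) = 1 := by omega
    have hndq : PySem.Int.band (m >>> k) 1 = nd k m := rfl
    have hT := hrep
    simp only [rep] at hT
    subst hT
    rw [hrev]
    simp only [trieQuery, Int.toNat_natCast, hndq]
    rw [← hrev]
    rcases eq_or_ne (S.filter (fun x => nd k x == (1 - nd k m))) [] with hS1 | hS1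
    · -- opposite side empty: every element has digit nd k m
      have hchild := (child_fold_rep k S (1 - nd k m) hopp).1 hS1
      have hall : ∀ x ∈ S, nd k x = nd k m := by
        intro x hx
        have hnx := nd_cases k x
        by_contra hne'
        have : x ∈ S.filter (fun x => nd k x == (1 - nd k m)) :=
          List.mem_filter.mpr ⟨hx, by simp; omega⟩
        rw [hS1] at this
        simp at this
      have hS0 : S.filter (fun x => nd k x == nd k m) = S :=
        List.filter_eq_self.mpr (fun x hx => by simp [hall x hx])
      have hc := (child_fold_rep k S (nd k m) hdm).2 (by rw [hS0]; exact hS)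
      rw [if_neg (by simp [hchild])]
      rw [hS0] at hc
      rw [ih S m r _ hS hc.2]
      congr 1
      congr 1
      apply List.map_congr_left
      intro x hx
      simp [xorV, hall x hx]
    · -- opposite side present: take it, gain 2^k
      have hc := (child_fold_rep k S (1 - nd k m) hopp).2 hS1
      rw [if_pos (by simpa using hc.1)]
      rw [ih _ m _ _ hS1 hc.2]
      have hsplit := maxO_split S (fun x => nd k x == (1 - nd k m))
        (fun x => xorV (k + 1) m x) (fun x => xorV k m x) (2 ^ k)
        (fun x hx hp => by
          have := nd_cases k x
          simp at hp
          simp [xorV]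
          omega)
        (fun x hx hp => by
          have hnx := nd_cases k x
          simp at hp
          have : nd k m = nd k x := by omega
          simp [xorV, this]
          exact xorV_lt k m x)
        (fun x hx => xorV_nonneg k m x)
        hS1
      rw [hsplit]
      ring

-- ============ the while loop over sorted nums ============

theorem takeWhile_le_prefix (L L' : Int) (h : L ≤ L') (ns : List Int) :
    ns.takeWhile (fun x => decide (x ≤ L)) <+: ns.takeWhile (fun x => decide (x ≤ L')) := by
  induction ns with
  | nil => simp
  | cons a t ih =>
    by_cases ha : a ≤ L
    · have ha' : a ≤ L' := le_trans ha h
      simpa [List.takeWhile_cons, ha, ha'] using ih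
    · simp [List.takeWhile_cons, ha]

theorem filter_eq_takeWhile_of_sorted (L : Int) (ns : List Int) (hs : ns.Pairwise (· ≤ ·)) :
    ns.filter (fun x => decide (x ≤ L)) = ns.takeWhile (fun x => decide (x ≤ L)) := by
  induction ns with
  | nil => rfl
  | cons a t ih =>
    rcases List.pairwise_cons.mp hs with ⟨hp, ht⟩
    by_cases ha : a ≤ L
    · simp [ha, ih ht]
    · simp only [List.filter_cons, List.takeWhile_cons]
      simp only [decide_eq_true_eq]
      rw [if_neg ha, if_neg ha]
      rw [List.filter_eq_nil_iff.mpr]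
      intro x hx
      simp only [decide_eq_true_eq]
      intro hxL
      exact ha (le_trans (hp x hx) hxL)

theorem insWhile_eq (ns : List Int) (hs : ns.Pairwise (· ≤ ·)) (L : Int) (j : Nat) (t : PyTrie)
    (hj : j ≤ (ns.takeWhile (fun x => decide (x ≤ L))).length) :
    insWhile ns L j t
      = ((ns.takeWhile (fun x => decide (x ≤ L))).length,
         ((ns.takeWhile (fun x => decide (x ≤ L))).drop j).foldl
           (fun t x => trieIns t x (PySem.List.pyRange 31 (-1) (-1))) t) := by
  set w := ns.takeWhile (fun x => decide (x ≤ L)) with hw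
  have hpre : w <+: ns := List.takeWhile_prefix _
  obtain ⟨rest, hrest⟩ := hpre
  suffices H : ∀ (n j : Nat) (t : PyTrie), j ≤ w.length → w.length - j = n →
      insWhile ns L j t = (w.length, (w.drop j).foldl
        (fun t x => trieIns t x (PySem.List.pyRange 31 (-1) (-1))) t) from
    H _ j t hj rfl
  intro n
  induction n with
  | zero =>
    intro j t hj hn
    have hjw : j = w.length := by omega
    subst hjw
    rw [insWhile]
    rw [dif_neg]
    · simp
    · rintro ⟨hlt, hle⟩
      have hrw : rest ≠ [] := by
        intro h
        rw [h, List.append_nil] at hrest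
        rw [← hrest] at hlt
        omega
      obtain ⟨b, rest', rfl⟩ := List.exists_cons_of_ne_nil hrw
      have hb : decide (b ≤ L) = false := by
        have hdw : ns.dropWhile (fun x => decide (x ≤ L)) = b :: rest' := by
          have h2 : w ++ ns.dropWhile (fun x => decide (x ≤ L)) = ns := by
            rw [hw]; exact List.takeWhile_append_dropWhile
          exact List.append_cancel_left (h2.trans hrest.symm)
        have h3 := List.head?_dropWhile_not (fun x => decide (x ≤ L)) ns
        rw [hdw] at h3
        simpa using h3
      have hget : ns.getD w.length 0 = b := by
        rw [← hrest]
        rw [List.getD_eq_getElem?_getD]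
        rw [List.getElem?_append_right (le_refl _)]
        simp
      rw [hget] at hle
      simp at hb
      omega
  | succ n ih =>
    intro j t hj hn
    have hjlt : j < w.length := by omega
    have hjns : j < ns.length := by
      have hlen : w.length ≤ ns.length := by rw [← hrest]; simp
      omega
    have hget : ns.getD j 0 = w[j] := by
      rw [← hrest, List.getD_eq_getElem?_getD, List.getElem?_append_left hjlt]
      simp [hjlt]
    have hpj : decide (w[j] ≤ L) = true := by
      have hmem : w[j] ∈ ns.takeWhile (fun x => decide (x ≤ L)) := by
        rw [← hw]; exact List.getElem_mem hjlt
      exact List.mem_takeWhile_imp (p := fun x => decide (x ≤ L)) (l := ns) hmem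
    rw [insWhile]
    rw [dif_pos ⟨hjns, by rw [hget]; simpa using hpj⟩]
    rw [ih (j + 1) _ (by omega) (by omega)]
    rw [List.drop_eq_getElem_cons hjlt, List.foldl_cons, hget]

-- ============ per-query result and the main loop ============

-- the value A produces for a query with fields (num, limit), given sorted nums
def res (ns : List Int) (q : List Int) : Int :=
  let w := ns.takeWhile (fun x => decide (x ≤ PySem.List.pyGetD q 1 0))
  if w = [] then -1
  else trieQuery (w.foldl (fun t x => trieIns t x (PySem.List.pyRange 31 (-1) (-1))) PyTrie.nil)
    (PySem.List.pyGetD q 0 0) (PySem.List.pyRange 31 (-1) (-1)) 0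

theorem loopA (ns : List Int) (hs : ns.Pairwise (· ≤ ·)) :
    ∀ (l : List (Int × List Int)) (j : Nat) (t : PyTrie) (acc : List (Int × Int)),
      l.Pairwise (fun a b => PySem.List.pyGetD a.2 1 0 ≤ PySem.List.pyGetD b.2 1 0) →
      t = (ns.take j).foldl (fun t x => trieIns t x (PySem.List.pyRange 31 (-1) (-1))) PyTrie.nil →
      (∀ q ∈ l, j ≤ (ns.takeWhile (fun x => decide (x ≤ PySem.List.pyGetD q.2 1 0))).length) →
      (l.foldl
        (fun (st : Nat × PyTrie × List (Int × Int)) query =>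
          let index := query.1
          let limit := PySem.List.pyGetD query.2 1 0
          let num := PySem.List.pyGetD query.2 0 0
          let jt := insWhile ns limit st.1 st.2.1
          if jt.2.isEmpty then
            (jt.1, jt.2, st.2.2 ++ [((-1 : Int), index)])
          else
            (jt.1, jt.2, st.2.2 ++ [(trieQuery jt.2 num (PySem.List.pyRange 31 (-1) (-1)) 0, index)]))
        (j, t, acc)).2.2
        = acc ++ l.map (fun q => (res ns q.2, q.1)) := by
  intro l
  induction l with
  | nil => intro j t acc _ _ _; simp
  | cons q l' ih =>
    intro j t acc hpw ht hj
    rcases List.pairwise_cons.mp hpw with ⟨hq, hpw'⟩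
    set L := PySem.List.pyGetD q.2 1 0 with hL
    set w := ns.takeWhile (fun x => decide (x ≤ L)) with hwdef
    have hjw : j ≤ w.length := hj q (List.mem_cons_self)
    have hwpre : w <+: ns := List.takeWhile_prefix _
    obtain ⟨rest, hrest⟩ := hwpre
    have htake : ns.take j = w.take j := by
      rw [← hrest, List.take_append_of_le_length hjw]
    have hins := insWhile_eq ns hs L j t hjw
    rw [← hwdef] at hins
    have hfold : (w.drop j).foldl
        (fun t x => trieIns t x (PySem.List.pyRange 31 (-1) (-1))) t
        = w.foldl (fun t x => trieIns t x (PySem.List.pyRange 31 (-1) (-1))) PyTrie.nil := by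
      rw [ht, htake, ← List.foldl_append, List.take_append_drop]
    set T := w.foldl (fun t x => trieIns t x (PySem.List.pyRange 31 (-1) (-1))) PyTrie.nil with hT
    have hres : res ns q.2 = (if w = [] then (-1 : Int)
        else trieQuery T (PySem.List.pyGetD q.2 0 0) (PySem.List.pyRange 31 (-1) (-1)) 0) := by
      simp only [res]
      rw [← hL, ← hwdef, ← hT]
    have hval : (if T.isEmpty then (acc ++ [((-1 : Int), q.1)])
        else (acc ++ [(trieQuery T (PySem.List.pyGetD q.2 0 0) (PySem.List.pyRange 31 (-1) (-1)) 0, q.1)]))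
        = acc ++ [(res ns q.2, q.1)] := by
      rw [hres]
      rcases eq_or_ne w [] with hw | hw
      · have hTnil : T = PyTrie.nil := by rw [hT, hw]; rfl
        rw [if_pos hw, hTnil]
        simp [PyTrie.isEmpty]
      · have hTfold := isEmpty_foldl w PyTrie.nil
        rw [← bits32_eq, ← hT] at hTfold
        rcases hTfold with hE | ⟨hw', _⟩
        · rw [if_neg hw]
          simp [hE]
        · exact absurd hw' hw
    have hstep : (let index := q.1
          let limit := PySem.List.pyGetD q.2 1 0
          let num := PySem.List.pyGetD q.2 0 0
          let jt := insWhile ns limit (j, t, acc).1 (j, t, acc).2.1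
          if jt.2.isEmpty then
            (jt.1, jt.2, (j, t, acc).2.2 ++ [((-1 : Int), index)])
          else
            (jt.1, jt.2, (j, t, acc).2.2 ++
              [(trieQuery jt.2 num (PySem.List.pyRange 31 (-1) (-1)) 0, index)]))
        = ((w.length, T, acc ++ [(res ns q.2, q.1)]) : Nat × PyTrie × List (Int × Int)) := by
      show (let jt := insWhile ns (PySem.List.pyGetD q.2 1 0) j t
            if jt.2.isEmpty then
              ((jt.1, jt.2, acc ++ [((-1 : Int), q.1)]) : Nat × PyTrie × List (Int × Int))
            else (jt.1, jt.2, acc ++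
              [(trieQuery jt.2 (PySem.List.pyGetD q.2 0 0) (PySem.List.pyRange 31 (-1) (-1)) 0, q.1)]))
          = (w.length, T, acc ++ [(res ns q.2, q.1)])
      simp only [← hL, hins, hfold]
      rcases eq_or_ne T.isEmpty true with hE | hE
      · rw [if_pos hE]
        rw [if_pos hE] at hval
        rw [hval]
      · rw [if_neg hE]
        rw [if_neg hE] at hval
        rw [hval]
    rw [List.foldl_cons, hstep]
    rw [ih w.length T (acc ++ [(res ns q.2, q.1)]) hpw'
      (by
        rw [hT]
        congr 1
        rw [← hrest, List.take_append_of_le_length (le_refl _), List.take_length])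
      (by
        intro q' hq'
        have hLle : L ≤ PySem.List.pyGetD q'.2 1 0 := hq q' hq'
        have hlen := (takeWhile_le_prefix L _ hLle ns).length_le
        rw [← hwdef] at hlen
        exact hlen)]
    simp

-- per query: A's trie answer equals B's brute-force answer
theorem perQuery (ns : List Int) (hs : ns.Pairwise (· ≤ ·)) (q : List Int) :
    res ns q =
      (let num := PySem.List.pyGetD q 0 0
       let limit := PySem.List.pyGetD q 1 0
       let cands := (ns.filter (fun x => decide (x ≤ limit))).map
         (fun x => PySem.Int.band x ((1 <<< 32) - 1))
       if cands = [] then (-1 : Int)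
       else (PySem.List.max? (cands.map
          (fun c => PySem.Int.bxor (PySem.Int.band num ((1 <<< 32) - 1)) c))
          (fun y => y)).getD 0) := by
  simp only [res]
  rw [filter_eq_takeWhile_of_sorted (PySem.List.pyGetD q 1 0) ns hs]
  set m := PySem.List.pyGetD q 0 0 with hm
  set w := ns.takeWhile (fun x => decide (x ≤ PySem.List.pyGetD q 1 0)) with hw
  rcases eq_or_ne w [] with hwe | hwe
  · simp [hwe]
  · rw [if_neg hwe, if_neg (by simpa using hwe)]
    have hlist : (w.map (fun x => PySem.Int.band x ((1 <<< 32) - 1))).map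
        (fun c => PySem.Int.bxor (PySem.Int.band m ((1 <<< 32) - 1)) c)
        = w.map (fun x => xorV 32 m x) := by
      rw [List.map_map]
      exact List.map_congr_left (fun x _ => XKey m x)
    rw [hlist]
    rw [max?_getD_eq_maxO _ (by simpa using hwe)]
    rw [bits32_eq]
    rw [greedy 32 w m 0 _ hwe rfl]
    ring

-- ===== VERDICT (by name: the statement is the Claim_ definition above) =====
theorem maximizeXor_spec : Claim_equal_maximizeXor := by
  intro nums queries hdom hpre
  unfold Spec_maximizeXor
  simp only [maximizeXor, maximizeXor_alt]
  set ns := PySem.List.sorted nums (fun x => x) false with hns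
  have hs : ns.Pairwise (· ≤ ·) := PySem.List.sorted_pairwise nums (fun x => x)
  set sq := PySem.List.sorted (PySem.List.enumerate queries)
    (fun p => PySem.List.pyGetD p.2 1 0) false with hsq
  have hloop := loopA ns hs sq 0 PyTrie.nil []
    (PySem.List.sorted_pairwise _ _) (by simp) (fun q _ => Nat.zero_le _)
  rw [hloop]
  have hperm : ((PySem.List.enumerate queries).map (fun q => (res ns q.2, q.1))).Perm
      (sq.map (fun q => (res ns q.2, q.1))) :=
    ((PySem.List.sorted_perm _ _ _).map _).symm
  have hpwT : ((PySem.List.enumerate queries).map (fun q => (res ns q.2, q.1))).Pairwise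
      (fun a b => a.2 < b.2) := by
    apply List.Pairwise.map _ _ (PySem.List.pairwise_lt_enumerate queries 0)
    intro a b hab
    simpa using hab
  rw [List.nil_append]
  have heq := PySem.List.sorted_eq_of_perm_of_pairwise_lt _ _
    (fun p : Int × Int => p.2) hperm hpwT
  rw [heq]
  rw [List.map_map]
  have hsnd : (PySem.List.enumerate queries).map
      ((fun p : Int × Int => p.1) ∘ (fun q : Int × List Int => (res ns q.2, q.1)))
      = queries.map (fun q => res ns q) := by
    have h1 : ((fun p : Int × Int => p.1) ∘ (fun q : Int × List Int => (res ns q.2, q.1)))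
        = (fun q => res ns q) ∘ (fun p : Int × List Int => p.2) := rfl
    rw [h1, ← List.map_map, PySem.List.map_snd_enumerate]
  rw [hsnd]
  exact List.map_congr_left (fun q _ => perQuery ns hs q)
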